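-- pv_equiv track=rewrite | github.com/jasonbluewizard/xmlfixer | server/distractor-improver.py | detect_operation_and_calculate
-- ===== SOURCE A (Python) =====
-- def detect_operation_and_calculate(question_text, numbers):
--     """Detect mathematical operation and calculate expected result"""
--     text_lower = question_text.lower()
--
--     if len(numbers) < 2:
--         return None, "insufficient_numbers"
--
--     # Addition detection
--     if any(word in text_lower for word in ['add', 'adds', 'plus', 'total', 'together', 'sum', 'altogether', 'combined', 'more']):
--         return sum(numbers), "addition"
--
--     # Subtraction detection
--     elif any(word in text_lower for word in ['subtract', 'minus', 'left', 'remaining', 'difference', 'fewer', 'less', 'need', 'needs']):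
--         if 'how many more' in text_lower or ('how many' in text_lower and 'need' in text_lower):
--             return max(numbers) - min(numbers), "subtraction"
--         else:
--             return numbers[0] - numbers[1], "subtraction"
--
--     # Multiplication detection
--     elif any(word in text_lower for word in ['multiply', 'times', 'each', 'per', 'groups of', 'needed', 'total']):
--         if 'per' in text_lower or 'each' in text_lower:
--             return numbers[0] * numbers[1], "multiplication"
--         else:
--             return numbers[0] * numbers[1], "multiplication"
--
--     # Division detection
--     elif any(word in text_lower for word in ['divide', 'split', 'equally', 'share', 'groups', 'each group', 'evenly', 'among', 'brew', 'make']):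
--         if numbers[1] != 0:
--             return numbers[0] // numbers[1], "division"
--         else:
--             return None, "division_by_zero"
--
--     return None, "operation_unclear"
-- ===== SOURCE B (Python) =====
-- _ADD = ['add', 'adds', 'plus', 'total', 'together', 'sum', 'altogether', 'combined', 'more']
-- _SUB = ['subtract', 'minus', 'left', 'remaining', 'difference', 'fewer', 'less', 'need', 'needs']
-- _MUL = ['multiply', 'times', 'each', 'per', 'groups of', 'needed', 'total']
-- _DIV = ['divide', 'split', 'equally', 'share', 'groups', 'each group', 'evenly', 'among', 'brew', 'make']
--
-- # one flat keyword table tagged with operation precedence (0 = addition ... 3 = division)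
-- _KEYWORD_OPS = [(kw, 0) for kw in _ADD] + [(kw, 1) for kw in _SUB] + \
--                [(kw, 2) for kw in _MUL] + [(kw, 3) for kw in _DIV]
--
--
-- def detect_operation_and_calculate(question_text, numbers):
--     """Single left-to-right scan of the text: at each position, prefix-match the flat
--     keyword table and keep the minimum (highest-precedence) operation tag seen;
--     then dispatch once on that tag."""
--     t = question_text.lower()
--
--     if len(numbers) < 2:
--         return None, "insufficient_numbers"
--
--     best = 4
--     for i in range(len(t)):
--         for kw, op in _KEYWORD_OPS:
--             if t.startswith(kw, i):
--                 best = min(best, op)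
--
--     if best == 0:
--         return sum(numbers), "addition"
--     if best == 1:
--         if 'how many more' in t or ('how many' in t and 'need' in t):
--             return max(numbers) - min(numbers), "subtraction"
--         return numbers[0] - numbers[1], "subtraction"
--     if best == 2:
--         return numbers[0] * numbers[1], "multiplication"
--     if best == 3:
--         if numbers[1] != 0:
--             return numbers[0] // numbers[1], "division"
--         return None, "division_by_zero"
--     return None, "operation_unclear"
-- ===== Notes on version B (the rewrite author's own statement) =====
-- stated objective: alternative
-- what changed: Replaced the per-branch substring-membership chain (four separate any(word in text) scans taken in elif order) by a single left-to-right scan over text positions that prefix-matches one flat precedence-tagged keyword table and accumulates the minimum operation tag, followed by one dispatch on that tag.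
import Mathlib
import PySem

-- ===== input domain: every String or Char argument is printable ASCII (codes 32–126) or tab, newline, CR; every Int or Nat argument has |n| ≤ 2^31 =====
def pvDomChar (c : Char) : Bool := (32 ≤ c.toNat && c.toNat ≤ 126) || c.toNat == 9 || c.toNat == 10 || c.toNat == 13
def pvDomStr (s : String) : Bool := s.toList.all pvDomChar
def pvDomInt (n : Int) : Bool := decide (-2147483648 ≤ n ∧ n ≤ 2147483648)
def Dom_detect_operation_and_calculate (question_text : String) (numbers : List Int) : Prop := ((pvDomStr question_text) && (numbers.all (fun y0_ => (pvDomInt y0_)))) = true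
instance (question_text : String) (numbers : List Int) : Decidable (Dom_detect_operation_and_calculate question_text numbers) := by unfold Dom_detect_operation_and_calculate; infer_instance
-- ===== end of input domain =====

-- B replaces A's four per-branch any(word in text) membership scans by ONE left-to-right
-- scan over text positions that prefix-matches a flat precedence-tagged keyword table and
-- accumulates the minimum operation tag, then dispatches once on that tag (objective:
-- alternative algorithm; same asymptotic cost, not faster).

-- ===== PORT A =====
-- literal transliteration of A's if/elif chain; numbers[i] via pyGetD (len ≥ 2 guards it),
-- max/min via PySem.List.max?/min? (.getD 0 never fires: the list is nonempty there)
def detect_operation_and_calculate (question_text : String) (numbers : List Int) : Option Int × String :=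
  let t := PySem.Str.lower question_text
  if numbers.length < 2 then (none, "insufficient_numbers")
  else if (["add", "adds", "plus", "total", "together", "sum", "altogether", "combined", "more"].any
      (fun w => PySem.Str.isIn w t)) then
    (some numbers.sum, "addition")
  else if (["subtract", "minus", "left", "remaining", "difference", "fewer", "less", "need", "needs"].any
      (fun w => PySem.Str.isIn w t)) then
    if PySem.Str.isIn "how many more" t || (PySem.Str.isIn "how many" t && PySem.Str.isIn "need" t) then
      (some ((PySem.List.max? numbers (fun x => x)).getD 0 - (PySem.List.min? numbers (fun x => x)).getD 0), "subtraction")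
    else
      (some (PySem.List.pyGetD numbers 0 0 - PySem.List.pyGetD numbers 1 0), "subtraction")
  else if (["multiply", "times", "each", "per", "groups of", "needed", "total"].any
      (fun w => PySem.Str.isIn w t)) then
    if PySem.Str.isIn "per" t || PySem.Str.isIn "each" t then
      (some (PySem.List.pyGetD numbers 0 0 * PySem.List.pyGetD numbers 1 0), "multiplication")
    else
      (some (PySem.List.pyGetD numbers 0 0 * PySem.List.pyGetD numbers 1 0), "multiplication")
  else if (["divide", "split", "equally", "share", "groups", "each group", "evenly", "among", "brew", "make"].any
      (fun w => PySem.Str.isIn w t)) then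
    if PySem.List.pyGetD numbers 1 0 ≠ 0 then
      (some (PySem.Int.floordiv (PySem.List.pyGetD numbers 0 0) (PySem.List.pyGetD numbers 1 0)), "division")
    else (none, "division_by_zero")
  else (none, "operation_unclear")

-- ===== PORT B =====
-- keyword groups as char lists (the Python module-level lists)
def pvAddKws : List (List Char) :=
  ["add", "adds", "plus", "total", "together", "sum", "altogether", "combined", "more"].map String.toList
def pvSubKws : List (List Char) :=
  ["subtract", "minus", "left", "remaining", "difference", "fewer", "less", "need", "needs"].map String.toList
def pvMulKws : List (List Char) :=
  ["multiply", "times", "each", "per", "groups of", "needed", "total"].map String.toList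
def pvDivKws : List (List Char) :=
  ["divide", "split", "equally", "share", "groups", "each group", "evenly", "among", "brew", "make"].map String.toList

-- _KEYWORD_OPS = [(kw,0) for kw in _ADD] + … : flat precedence-tagged table
def pvTag (k : Nat) (kws : List (List Char)) : List (List Char × Nat) := kws.map (fun kw => (kw, k))
def pvKeywordOps : List (List Char × Nat) :=
  pvTag 0 pvAddKws ++ pvTag 1 pvSubKws ++ pvTag 2 pvMulKws ++ pvTag 3 pvDivKws

-- inner loop: for kw, op in _KEYWORD_OPS: if t.startswith(kw, i): best = min(best, op)
def pvStep (s : List Char) (best : Nat) : Nat :=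
  pvKeywordOps.foldl (fun b e => if e.1.isPrefixOf s then min b e.2 else b) best

-- outer loop: for i in range(len(t)) — structural recursion over the suffixes of t
def pvScan (best : Nat) : List Char → Nat
  | [] => best
  | c :: rest => pvScan (pvStep (c :: rest) best) rest

def detect_operation_and_calculate_alt (question_text : String) (numbers : List Int) : Option Int × String :=
  let t := PySem.Str.lower question_text
  if numbers.length < 2 then (none, "insufficient_numbers")
  else
    let best := pvScan 4 t.toList
    if best = 0 then (some numbers.sum, "addition")
    else if best = 1 then
      if PySem.Str.isIn "how many more" t || (PySem.Str.isIn "how many" t && PySem.Str.isIn "need" t) then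
        (some ((PySem.List.max? numbers (fun x => x)).getD 0 - (PySem.List.min? numbers (fun x => x)).getD 0), "subtraction")
      else (some (PySem.List.pyGetD numbers 0 0 - PySem.List.pyGetD numbers 1 0), "subtraction")
    else if best = 2 then (some (PySem.List.pyGetD numbers 0 0 * PySem.List.pyGetD numbers 1 0), "multiplication")
    else if best = 3 then
      if PySem.List.pyGetD numbers 1 0 ≠ 0 then
        (some (PySem.Int.floordiv (PySem.List.pyGetD numbers 0 0) (PySem.List.pyGetD numbers 1 0)), "division")
      else (none, "division_by_zero")
    else (none, "operation_unclear")

-- ===== PRECONDITION & SPEC =====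
def Spec_detect_operation_and_calculate (question_text : String) (numbers : List Int) (out : Option Int × String) : Prop := out = detect_operation_and_calculate_alt question_text numbers
instance (question_text : String) (numbers : List Int) (out : Option Int × String) : Decidable (Spec_detect_operation_and_calculate question_text numbers out) := by unfold Spec_detect_operation_and_calculate; infer_instance

-- ===== CLAIM (what is proved, stated in full; the proofs are below) =====
def Claim_equal_detect_operation_and_calculate : Prop := ∀ (question_text : String) (numbers : List Int), Dom_detect_operation_and_calculate question_text numbers → Spec_detect_operation_and_calculate question_text numbers (detect_operation_and_calculate question_text numbers)

-- ===== LEMMAS AND PROOFS =====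

-- group membership predicates: some keyword of the group is an infix / prefix of s
def pvInfixAny (g : List (List Char)) (s : List Char) : Bool :=
  g.any (fun kw => PySem.Chars.isIn kw s)
def pvPrefixAny (g : List (List Char)) (s : List Char) : Bool :=
  g.any (fun kw => kw.isPrefixOf s)

-- first-match cascade over the four groups
def pvCascade (b0 b1 b2 b3 : Bool) : Nat :=
  if b0 then 0 else if b1 then 1 else if b2 then 2 else if b3 then 3 else 4

-- the fold of `min`-updates commutes with min in its initial accumulator
theorem pvFoldl_min (L : List (List Char × Nat)) (s : List Char) :
    ∀ a b, L.foldl (fun b e => if e.1.isPrefixOf s then min b e.2 else b) (min a b)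
      = min a (L.foldl (fun b e => if e.1.isPrefixOf s then min b e.2 else b) b) := by
  induction L with
  | nil => intro a b; rfl
  | cons e L ih =>
    intro a b
    simp only [List.foldl_cons]
    by_cases h : e.1.isPrefixOf s
    · simp only [h, if_true, Nat.min_assoc]; exact ih a (min b e.2)
    · simp only [h, if_false]; exact ih a b

-- a uniformly-tagged group folds to: any prefix match → min with the tag
theorem pvTag_fold (k : Nat) (g : List (List Char)) (s : List Char) :
    ∀ b, (pvTag k g).foldl (fun b e => if e.1.isPrefixOf s then min b e.2 else b) b
      = if pvPrefixAny g s then min b k else b := by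
  induction g with
  | nil => intro b; simp [pvTag, pvPrefixAny]
  | cons kw g ih =>
    intro b
    simp only [pvTag, List.map_cons, List.foldl_cons, pvPrefixAny, List.any_cons] at ih ⊢
    by_cases h : kw.isPrefixOf s = true
    · simp only [h, if_true, Bool.true_or]
      rw [ih (min b k)]
      split_ifs <;> omega
    · simp only [Bool.not_eq_true] at h
      simp only [h, Bool.false_eq_true, if_false, Bool.false_or]
      exact ih b

-- the inner fold commutes with min in its accumulator (special case of pvFoldl_min)
theorem pvStep_min (s : List Char) (a b : Nat) :
    pvStep s (min a b) = min a (pvStep s b) := pvFoldl_min pvKeywordOps s a b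

-- pvStep computes: min of best and the cascade over prefix matches at this position
theorem pvStep_eq (s : List Char) (b : Nat) (hb : b ≤ 4) :
    pvStep s b = min b (pvCascade (pvPrefixAny pvAddKws s) (pvPrefixAny pvSubKws s)
      (pvPrefixAny pvMulKws s) (pvPrefixAny pvDivKws s)) := by
  unfold pvStep pvKeywordOps
  rw [List.foldl_append, List.foldl_append, List.foldl_append]
  rw [pvTag_fold, pvTag_fold, pvTag_fold, pvTag_fold]
  cases h0 : pvPrefixAny pvAddKws s <;> cases h1 : pvPrefixAny pvSubKws s <;>
    cases h2 : pvPrefixAny pvMulKws s <;> cases h3 : pvPrefixAny pvDivKws s <;>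
    simp [pvCascade] <;> omega

-- the scan commutes with min in its initial accumulator
theorem pvScan_min (s : List Char) : ∀ a b, pvScan (min a b) s = min a (pvScan b s) := by
  induction s with
  | nil => intro a b; rfl
  | cons c rest ih =>
    intro a b
    show pvScan (pvStep (c :: rest) (min a b)) rest = min a (pvScan (pvStep (c :: rest) b) rest)
    rw [pvStep_min, ih]

-- infix over cons splits into prefix-here or infix-of-tail, lifted to groups
theorem pvInfixAny_cons (g : List (List Char)) (c : Char) (rest : List Char) :
    pvInfixAny g (c :: rest) = (pvPrefixAny g (c :: rest) || pvInfixAny g rest) := by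
  unfold pvInfixAny pvPrefixAny
  induction g with
  | nil => rfl
  | cons kw g ih =>
    simp only [List.any_cons]
    rw [ih]
    have : PySem.Chars.isIn kw (c :: rest) = (kw.isPrefixOf (c :: rest) || PySem.Chars.isIn kw rest) := by
      rcases h : PySem.Chars.isIn kw (c :: rest) with _ | _
      · rw [PySem.Chars.isIn_eq_false_iff] at h
        rw [List.infix_cons_iff] at h
        push_neg at h
        symm; rw [Bool.or_eq_false_iff]
        constructor
        · rw [← Bool.not_eq_true, List.isPrefixOf_iff_prefix]; exact h.1
        · rw [PySem.Chars.isIn_eq_false_iff]; exact h.2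
      · rw [PySem.Chars.isIn_iff_infix, List.infix_cons_iff] at h
        symm; rw [Bool.or_eq_true_iff]
        rcases h with h | h
        · left; rw [List.isPrefixOf_iff_prefix]; exact h
        · right; rw [PySem.Chars.isIn_iff_infix]; exact h
    rw [this]
    cases kw.isPrefixOf (c :: rest) <;> cases PySem.Chars.isIn kw rest <;>
      cases g.any (fun kw => kw.isPrefixOf (c :: rest)) <;>
      cases g.any (fun kw => PySem.Chars.isIn kw rest) <;> rfl

-- the two cascades combine by min
theorem pvCascade_min (p0 p1 p2 p3 q0 q1 q2 q3 : Bool) :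
    min (pvCascade p0 p1 p2 p3) (pvCascade q0 q1 q2 q3)
      = pvCascade (p0 || q0) (p1 || q1) (p2 || q2) (p3 || q3) := by
  cases p0 <;> cases p1 <;> cases p2 <;> cases p3 <;>
    cases q0 <;> cases q1 <;> cases q2 <;> cases q3 <;> rfl

-- MAIN INVARIANT: the scan over all suffixes computes the cascade over infix matches
theorem pvScan_eq (s : List Char) :
    pvScan 4 s = pvCascade (pvInfixAny pvAddKws s) (pvInfixAny pvSubKws s)
      (pvInfixAny pvMulKws s) (pvInfixAny pvDivKws s) := by
  induction s with
  | nil => decide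
  | cons c rest ih =>
    show pvScan (pvStep (c :: rest) 4) rest = _
    rw [pvStep_eq _ _ (by omega), Nat.min_comm, pvScan_min, ih, pvCascade_min,
      pvInfixAny_cons pvAddKws c rest, pvInfixAny_cons pvSubKws c rest,
      pvInfixAny_cons pvMulKws c rest, pvInfixAny_cons pvDivKws c rest]

-- A's group-membership tests, written on the lowered string, equal pvInfixAny
theorem pvAnyIsIn_eq (ws : List String) (t : String) :
    ws.any (fun w => PySem.Str.isIn w t) = pvInfixAny (ws.map String.toList) t.toList := by
  unfold pvInfixAny
  simp [List.any_map, Function.comp_def]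

-- ===== VERDICT (by name: the statement is the Claim_ definition above) =====
theorem detect_operation_and_calculate_spec : Claim_equal_detect_operation_and_calculate := by
  intro q ns _
  unfold Spec_detect_operation_and_calculate detect_operation_and_calculate detect_operation_and_calculate_alt
  by_cases hn : ns.length < 2
  · simp [hn]
  · simp only [hn, if_false, pvScan_eq, pvAddKws, pvSubKws, pvMulKws, pvDivKws, pvAnyIsIn_eq]
    cases h0 : pvInfixAny (["add", "adds", "plus", "total", "together", "sum", "altogether", "combined", "more"].map String.toList) (PySem.Str.lower q).toList <;>
    cases h1 : pvInfixAny (["subtract", "minus", "left", "remaining", "difference", "fewer", "less", "need", "needs"].map String.toList) (PySem.Str.lower q).toList <;>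
    cases h2 : pvInfixAny (["multiply", "times", "each", "per", "groups of", "needed", "total"].map String.toList) (PySem.Str.lower q).toList <;>
    cases h3 : pvInfixAny (["divide", "split", "equally", "share", "groups", "each group", "evenly", "among", "brew", "make"].map String.toList) (PySem.Str.lower q).toList <;>
    simp [pvCascade]
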